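-- pv_equiv track=rewrite | github.com/steveleward/hansard_parser | parse_hansard.py | _group_paras
-- ===== SOURCE A (Python) =====
-- def _group_paras(paras):
--     new_paras = []
--     paras = [dct for dct in paras if dct != {'speaker': '', 'text': ''}]
--     for i, para in enumerate(paras):
--         if para['speaker'] != '' or i == 0:
--             new_paras.append(para)
--         else:
--             new_paras[-1]['text'] += ' ' + para['text']
--     return new_paras
-- ===== SOURCE B (Python) =====
-- def _group_paras(paras):
--     # Two-pointer scan: find each speaker-led run [i, j) and join its texts once.
--     # Mutates the head dicts in place, like the original (only when there is
--     # something to merge).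
--     paras = [dct for dct in paras if dct != {'speaker': '', 'text': ''}]
--     out = []
--     i, n = 0, len(paras)
--     while i < n:
--         j = i + 1
--         while j < n and paras[j]['speaker'] == '':
--             j += 1
--         head = paras[i]
--         if j > i + 1:
--             head['text'] = ' '.join([head['text']] + [d['text'] for d in paras[i + 1:j]])
--         out.append(head)
--         i = j
--     return out
-- ===== Notes on version B (the rewrite author's own statement) =====
-- stated objective: alternative
-- what changed: Instead of appending and repeatedly mutating the last output element (text += ' ' + t), B scans each speaker-led run with two pointers and, when the run has continuations, joins the run's texts once with ' '.join, emitting the head dict per run.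
import Mathlib
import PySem

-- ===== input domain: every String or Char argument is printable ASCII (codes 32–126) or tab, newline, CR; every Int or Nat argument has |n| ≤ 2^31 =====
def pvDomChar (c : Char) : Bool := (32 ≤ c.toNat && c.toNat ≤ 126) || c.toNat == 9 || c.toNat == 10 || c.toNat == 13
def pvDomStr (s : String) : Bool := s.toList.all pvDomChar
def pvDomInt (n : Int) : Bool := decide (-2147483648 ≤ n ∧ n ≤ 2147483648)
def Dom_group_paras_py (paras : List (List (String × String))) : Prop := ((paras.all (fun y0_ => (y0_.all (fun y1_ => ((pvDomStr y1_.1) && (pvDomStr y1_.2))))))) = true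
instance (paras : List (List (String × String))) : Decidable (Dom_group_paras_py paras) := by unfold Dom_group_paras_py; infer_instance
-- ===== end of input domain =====

-- B changes the decomposition (per-run two-pointer scan + one ' '.join) instead of A's
-- append-and-mutate-last loop; equivalence is about the RETURN value (both Pythons mutate
-- the input dicts in place the same way).

-- shared helpers (both Pythons contain these very subexpressions)
-- d[k] lookup: first matching key; Python raises KeyError when absent — Pre_ excludes that,
-- so the "" default is never reached on admitted inputs.
def pvGet (d : List (String × String)) (k : String) : String :=
  (((d.find? (fun p => p.1 == k)).map (fun p => p.2)).getD "")

-- d[k] = v : overwrite in place (the harness converts an assoc list to a Python dict with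
-- the FIRST binding winning, so the first matching entry is the dict's entry)
def pvSet (d : List (String × String)) (k v : String) : List (String × String) :=
  match d with
  | [] => []
  | p :: rest => if p.1 == k then (p.1, v) :: rest else p :: pvSet rest k v

-- dct == {'speaker': '', 'text': ''} : Python dict equality — same key set, same values
-- (first binding wins in the assoc-list encoding)
def pvBlank (d : List (String × String)) : Bool :=
  d.all (fun p => p.1 == "speaker" || p.1 == "text") &&
    (d.map Prod.fst).contains "speaker" && (d.map Prod.fst).contains "text" &&
    pvGet d "speaker" == "" && pvGet d "text" == ""

-- ===== PORT A =====
-- for i, para in enumerate(paras): append, or new_paras[-1]['text'] += ' ' + para['text']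
def aLoop (xs : List (List (String × String))) (i : Nat)
    (acc : List (List (String × String))) : List (List (String × String)) :=
  match xs with
  | [] => acc
  | d :: rest =>
    if pvGet d "speaker" ≠ "" ∨ i = 0 then
      aLoop rest (i + 1) (acc ++ [d])
    else
      aLoop rest (i + 1)
        (acc.dropLast ++
          [pvSet (acc.getLastD []) "text"
            (pvGet (acc.getLastD []) "text" ++ " " ++ pvGet d "text")])

def group_paras_py (paras : List (List (String × String))) : List (List (String × String)) :=
  aLoop (paras.filter (fun d => !(pvBlank d))) 0 []

-- ===== PORT B =====
-- the inner while collects the continuation run rest[:k] / rest[k:] (k = first index with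
-- a nonempty speaker) = takeWhile / dropWhile; if the run is longer than the head alone
-- (j > i + 1), head['text'] = ' '.join([head['text']] + texts)
def bGo (xs : List (List (String × String))) : List (List (String × String)) :=
  match xs with
  | [] => []
  | h :: rest =>
    let cont := rest.takeWhile (fun d => pvGet d "speaker" == "")
    let rest' := rest.dropWhile (fun d => pvGet d "speaker" == "")
    (if cont.isEmpty then h
     else pvSet h "text" (PySem.Str.join " " (pvGet h "text" :: cont.map (fun d => pvGet d "text"))))
      :: bGo rest'
termination_by xs.length
decreasing_by
  have := List.length_dropWhile_le (fun d => pvGet d "speaker" == "") rest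
  simp only [List.length_cons]; omega

def group_paras_py_alt (paras : List (List (String × String))) : List (List (String × String)) :=
  bGo (paras.filter (fun d => !(pvBlank d)))

-- ===== PRECONDITION & SPEC =====
-- Pre_ excludes inputs where some paragraph lacks the 'speaker' key or where 'text' is
-- missing while some non-blank empty-speaker paragraph occurs (there a dict lookup can raise
-- KeyError); this simple two-case form also excludes a few inputs where the missing 'text'
-- is never read and A and B return the same value.
def Pre_group_paras_py (paras : List (List (String × String))) : Prop :=
  (∀ d ∈ paras, "speaker" ∈ d.map Prod.fst) ∧
    ((∀ d ∈ paras, pvBlank d = true ∨ pvGet d "speaker" ≠ "") ∨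
      (∀ d ∈ paras, "text" ∈ d.map Prod.fst))

instance (paras : List (List (String × String))) : Decidable (Pre_group_paras_py paras) := by
  unfold Pre_group_paras_py; infer_instance

def pvWitness_group_paras_py : (List (List (String × String))) :=
  [[("speaker", "Mr A"), ("text", "hello")], [("speaker", ""), ("text", "world")]]

def Spec_group_paras_py (paras : List (List (String × String))) (out : List (List (String × String))) : Prop := out = group_paras_py_alt paras
instance (paras : List (List (String × String))) (out : List (List (String × String))) : Decidable (Spec_group_paras_py paras out) := by unfold Spec_group_paras_py; infer_instance

-- ===== CLAIM (what is proved, stated in full; the proofs are below) =====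
def Claim_equal_group_paras_py : Prop := ∀ (paras : List (List (String × String))), Dom_group_paras_py paras → Pre_group_paras_py paras → Spec_group_paras_py paras (group_paras_py paras)

-- ===== LEMMAS AND PROOFS =====

theorem map_fst_pvSet (d : List (String × String)) (k v : String) :
    (pvSet d k v).map Prod.fst = d.map Prod.fst := by
  induction d with
  | nil => rfl
  | cons p rest ih =>
    by_cases h : p.1 = k <;> simp [pvSet, h, ih]

theorem pvGet_pvSet_self (d : List (String × String)) (k v : String)
    (hk : k ∈ d.map Prod.fst) : pvGet (pvSet d k v) k = v := by
  induction d with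
  | nil => simp at hk
  | cons p rest ih =>
    simp only [List.map_cons, List.mem_cons] at hk
    by_cases h : p.1 = k
    · simp [pvGet, pvSet, h]
    · have hk' : k ∈ rest.map Prod.fst := by tauto
      simpa [pvGet, pvSet, List.find?, h] using ih hk'

theorem pvSet_pvSet (d : List (String × String)) (k v w : String) :
    pvSet (pvSet d k v) k w = pvSet d k w := by
  induction d with
  | nil => rfl
  | cons p rest ih =>
    by_cases h : p.1 = k <;> simp [pvSet, h, ih]

theorem join_one (x : String) : PySem.Str.join " " [x] = x := by
  simp [PySem.Str.join]

theorem join_two (a b : String) (l : List String) :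
    PySem.Str.join " " (a :: b :: l) = PySem.Str.join " " ((a ++ " " ++ b) :: l) := by
  simp only [PySem.Str.join]
  rw [← String.toList_inj]
  simp only [String.toList_ofList]
  cases l <;> simp [PySem.Chars.join_cons_cons, PySem.Chars.join_singleton]

theorem bGo_nil : bGo [] = [] := by rw [bGo]

theorem bGo_cons (h : List (String × String)) (rest : List (List (String × String))) :
    bGo (h :: rest) =
      (if (rest.takeWhile (fun d => pvGet d "speaker" == "")).isEmpty then h
       else pvSet h "text"
        (PySem.Str.join " "
          (pvGet h "text" ::
            (rest.takeWhile (fun d => pvGet d "speaker" == "")).map (fun d => pvGet d "text"))))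
        :: bGo (rest.dropWhile (fun d => pvGet d "speaker" == "")) := by
  rw [bGo]

-- the loop of A, once past index 0, produces exactly B's groups
theorem aLoop_eq_bGo (xs : List (List (String × String)))
    (acc : List (List (String × String))) (h : List (String × String)) (i : Nat)
    (hi : i ≠ 0)
    (hx : (∀ d ∈ xs, pvGet d "speaker" ≠ "") ∨
      ("text" ∈ h.map Prod.fst ∧ ∀ d ∈ xs, "text" ∈ d.map Prod.fst)) :
    aLoop xs i (acc ++ [h]) = acc ++ bGo (h :: xs) := by
  induction xs generalizing acc h i with
  | nil =>
    rw [bGo_cons]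
    simp [aLoop, bGo_nil]
  | cons d xs ih =>
    by_cases hs : pvGet d "speaker" = ""
    · -- continuation: merged into h
      have htxt : ("text" ∈ h.map Prod.fst ∧ "text" ∈ d.map Prod.fst ∧
          ∀ e ∈ xs, "text" ∈ e.map Prod.fst) := by
        rcases hx with hx | hx
        · exact absurd hs (hx d (by simp))
        · exact ⟨hx.1, hx.2 d (by simp), fun e he => hx.2 e (List.mem_cons_of_mem _ he)⟩
      have hcond : ¬(pvGet d "speaker" ≠ "" ∨ i = 0) := by tauto
      rw [aLoop, if_neg hcond, List.dropLast_concat, List.getLastD_concat]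
      rw [ih acc _ (i + 1) (by omega)
        (Or.inr ⟨by rw [map_fst_pvSet]; exact htxt.1, htxt.2.2⟩)]
      congr 1
      rw [bGo_cons, bGo_cons]
      have hsb : (pvGet d "speaker" == "") = true := by simp [hs]
      simp only [List.takeWhile_cons, List.dropWhile_cons, hsb, if_pos, List.map_cons,
        List.isEmpty_cons, Bool.false_eq_true, if_false]
      cases hcw : xs.takeWhile (fun e => pvGet e "speaker" == "") with
      | nil =>
        simp only [List.isEmpty_nil, if_pos, List.map_nil]
        simp only [join_two, join_one]
      | cons c cs =>
        simp only [List.isEmpty_cons, Bool.false_eq_true, if_false, List.map_cons]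
        rw [pvGet_pvSet_self h "text" _ htxt.1, pvSet_pvSet]
        simp only [join_two]
    · -- new speaker: h is finished as-is
      have hcond : pvGet d "speaker" ≠ "" ∨ i = 0 := Or.inl hs
      rw [aLoop, if_pos hcond]
      have hx' : (∀ e ∈ xs, pvGet e "speaker" ≠ "") ∨
          ("text" ∈ d.map Prod.fst ∧ ∀ e ∈ xs, "text" ∈ e.map Prod.fst) := by
        rcases hx with hx | hx
        · exact Or.inl (fun e he => hx e (List.mem_cons_of_mem _ he))
        · exact Or.inr ⟨hx.2 d (by simp), fun e he => hx.2 e (List.mem_cons_of_mem _ he)⟩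
      rw [ih (acc ++ [h]) d (i + 1) (by omega) hx']
      rw [bGo_cons (h := h)]
      have hsb : (pvGet d "speaker" == "") = false := by simp [hs]
      simp only [List.takeWhile_cons, List.dropWhile_cons, hsb, Bool.false_eq_true, if_false,
        List.isEmpty_nil, if_pos]
      simp [List.append_assoc]

-- ===== VERDICT (by name: the statement is the Claim_ definition above) =====
theorem group_paras_py_spec : Claim_equal_group_paras_py := by
  intro paras _ hpre
  unfold Spec_group_paras_py group_paras_py group_paras_py_alt
  have hx : (∀ d ∈ paras.filter (fun d => !(pvBlank d)), pvGet d "speaker" ≠ "") ∨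
      (∀ d ∈ paras.filter (fun d => !(pvBlank d)), "text" ∈ d.map Prod.fst) := by
    rcases hpre.2 with hp | hp
    · refine Or.inl fun d hd => ?_
      rcases hp d (List.mem_of_mem_filter hd) with hb | hb
      · exact absurd hb (by simpa using List.of_mem_filter hd)
      · exact hb
    · exact Or.inr fun d hd => hp d (List.mem_of_mem_filter hd)
  cases hf : paras.filter (fun d => !(pvBlank d)) with
  | nil => rw [bGo_nil]; rfl
  | cons h t =>
    rw [hf] at hx
    have hstep : aLoop (h :: t) 0 [] = aLoop t 1 ([] ++ [h]) := by
      rw [aLoop, if_pos (Or.inr rfl)]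
    rw [hstep, aLoop_eq_bGo t [] h 1 (by omega) ?_]
    · rfl
    · rcases hx with hx | hx
      · exact Or.inl (fun e he => hx e (List.mem_cons_of_mem _ he))
      · exact Or.inr ⟨hx h (by simp), fun e he => hx e (List.mem_cons_of_mem _ he)⟩
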